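-- pv_equiv track=rewrite | github.com/DigendraSahu/Python | Loops.py | max_digit
-- ===== SOURCE A (Python) =====
-- def max_digit(n):
--     i = 1
--     max = 0
--     while n//i>0:
--         temp = (n//(i*10))*i + (n%i)
--         if(temp>max):
--             max = temp
--         i = i*10
--     return max
-- ===== SOURCE B (Python) =====
-- def max_digit(n):
--     # Greedy: the best single-digit removal deletes the leftmost digit that is
--     # strictly smaller than its right neighbour; if digits are non-increasing,
--     # delete the last digit. Done arithmetically on powers of 10, one pass.
--     if n <= 0:
--         return 0
--     p = 1
--     while p * 10 <= n:
--         p *= 10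
--     q = p
--     while q > 1:
--         if (n // q) % 10 < (n // (q // 10)) % 10:
--             return (n // (q * 10)) * q + n % q
--         q //= 10
--     return n // 10
-- ===== Notes on version B (the rewrite author's own statement) =====
-- stated objective: alternative
-- what changed: A tries every single-digit deletion and keeps the running maximum; B finds the answer in one greedy scan: delete the leftmost digit strictly smaller than its right neighbour, else the last digit.
import Mathlib
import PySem

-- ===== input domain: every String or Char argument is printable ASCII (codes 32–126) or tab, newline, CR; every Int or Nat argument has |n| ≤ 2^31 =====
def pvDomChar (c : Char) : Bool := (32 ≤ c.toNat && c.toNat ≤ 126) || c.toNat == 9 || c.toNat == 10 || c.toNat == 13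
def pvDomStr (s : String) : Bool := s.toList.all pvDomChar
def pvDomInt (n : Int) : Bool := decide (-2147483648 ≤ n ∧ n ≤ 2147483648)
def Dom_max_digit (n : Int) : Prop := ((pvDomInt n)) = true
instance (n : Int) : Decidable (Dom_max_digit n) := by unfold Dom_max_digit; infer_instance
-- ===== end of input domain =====

-- B replaces A's try-every-removal loop (max over all n-with-one-digit-deleted) by a
-- single greedy scan: delete the leftmost digit strictly smaller than its right
-- neighbour, else the last digit. Same value on every Int; objective: alternative.

-- ===== PORT A =====
-- A's while loop; `i` is always positive at run time (starts at 1, multiplied by 10),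
-- carried as hypothesis `hi` only for termination.
def maxLoop (n i mx : Int) (hi : 0 < i) : Int :=
  if h : PySem.Int.floordiv n i > 0 then
    let temp := PySem.Int.floordiv n (i * 10) * i + PySem.Int.mod n i
    maxLoop n (i * 10) (if temp > mx then temp else mx) (by positivity)
  else mx
termination_by (PySem.Int.floordiv n i).toNat
decreasing_by
  rw [PySem.Int.floordiv_eq_ediv_of_pos hi] at h
  rw [PySem.Int.floordiv_eq_ediv_of_pos hi,
      PySem.Int.floordiv_eq_ediv_of_pos (show (0:ℤ) < i * 10 by positivity),
      ← Int.ediv_ediv_of_nonneg hi.le]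
  omega

def max_digit (n : Int) : Int := maxLoop n 1 0 one_pos

-- ===== PORT B =====
-- `p = highest power of 10 that is ≤ n`; `p` is always positive (starts at 1).
def pLoop (n p : Int) (hp : 0 < p) : Int :=
  if h : p * 10 ≤ n then pLoop n (p * 10) (by positivity) else p
termination_by (n - p).toNat
decreasing_by omega

-- greedy scan from the most significant digit downward
def qLoop (n q : Int) : Int :=
  if h : 1 < q then
    if PySem.Int.mod (PySem.Int.floordiv n q) 10 <
       PySem.Int.mod (PySem.Int.floordiv n (PySem.Int.floordiv q 10)) 10 then
      PySem.Int.floordiv n (q * 10) * q + PySem.Int.mod n q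
    else qLoop n (PySem.Int.floordiv q 10)
  else PySem.Int.floordiv n 10
termination_by q.toNat
decreasing_by
  rw [PySem.Int.floordiv_eq_ediv_of_pos (show (0:ℤ) < 10 by norm_num)]
  omega

def max_digit_alt (n : Int) : Int :=
  if n ≤ 0 then 0 else qLoop n (pLoop n 1 one_pos)

-- ===== PRECONDITION & SPEC =====
def Spec_max_digit (n : Int) (out : Int) : Prop := out = max_digit_alt n
instance (n : Int) (out : Int) : Decidable (Spec_max_digit n out) := by unfold Spec_max_digit; infer_instance

-- ===== CLAIM (what is proved, stated in full; the proofs are below) =====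
def Claim_equal_max_digit : Prop := ∀ (n : Int), Dom_max_digit n → Spec_max_digit n (max_digit n)

-- ===== LEMMAS AND PROOFS =====

-- candidate value after deleting the digit of weight 10^k, and that digit
def tempv (n : Int) (k : ℕ) : Int := n / 10 ^ (k + 1) * 10 ^ k + n % 10 ^ k
def dig (n : Int) (k : ℕ) : Int := n / 10 ^ k % 10

lemma ediv_pow_succ (n : Int) (k : ℕ) : n / 10 ^ (k + 1) = n / 10 ^ k / 10 := by
  rw [pow_succ, ← Int.ediv_ediv_of_nonneg (by positivity)]

-- the maximum of the candidates tempv n j for j ≥ k (0 if none), mirroring A's loop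
def G (n : Int) (k : ℕ) : Int :=
  if h : 0 < n / 10 ^ k then max (tempv n k) (G n (k + 1)) else 0
termination_by (n / 10 ^ k).toNat
decreasing_by
  rw [ediv_pow_succ]
  omega

-- step equations of the ports, with floordiv/mod turned into Lean's ediv/emod
lemma maxLoop_step (n i mx : Int) (hi : 0 < i) :
    maxLoop n i mx hi =
      if 0 < n / i then
        maxLoop n (i * 10)
          (if n / (i * 10) * i + n % i > mx then n / (i * 10) * i + n % i else mx)
          (by positivity)
      else mx := by
  rw [maxLoop]
  simp only [PySem.Int.floordiv_eq_ediv_of_pos hi,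
    PySem.Int.floordiv_eq_ediv_of_pos (show (0:ℤ) < i * 10 by positivity),
    PySem.Int.mod_eq_emod_of_pos hi]
  rfl

lemma pLoop_step (n p : Int) (hp : 0 < p) :
    pLoop n p hp = if p * 10 ≤ n then pLoop n (p * 10) (by positivity) else p := by
  rw [pLoop]; rfl

lemma floordiv_eq_ediv_of_nonneg (a b : Int) (hb : 0 ≤ b) : PySem.Int.floordiv a b = a / b := by
  rcases eq_or_lt_of_le hb with h | h
  · simp [PySem.Int.floordiv, ← h]
  · exact PySem.Int.floordiv_eq_ediv_of_pos h

lemma qLoop_step (n q : Int) :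
    qLoop n q =
      if 1 < q then
        if n / q % 10 < n / (q / 10) % 10 then n / (q * 10) * q + n % q
        else qLoop n (q / 10)
      else n / 10 := by
  rw [qLoop]
  by_cases hq : 1 < q
  · have hq0 : (0:ℤ) < q := by omega
    have h10 : (0:ℤ) < 10 := by norm_num
    have hdiv : (0:ℤ) ≤ q / 10 := Int.ediv_nonneg hq0.le h10.le
    simp only [dif_pos hq, if_pos hq,
      PySem.Int.floordiv_eq_ediv_of_pos hq0,
      PySem.Int.floordiv_eq_ediv_of_pos h10,
      PySem.Int.floordiv_eq_ediv_of_pos (show (0:ℤ) < q * 10 by positivity),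
      floordiv_eq_ediv_of_nonneg _ _ hdiv,
      PySem.Int.mod_eq_emod_of_pos hq0, PySem.Int.mod_eq_emod_of_pos h10]
  · simp only [dif_neg hq, if_neg hq,
      PySem.Int.floordiv_eq_ediv_of_pos (show (0:ℤ) < 10 by norm_num)]

lemma dig_bounds (n : Int) (k : ℕ) : 0 ≤ dig n k ∧ dig n k < 10 := by
  exact ⟨Int.emod_nonneg _ (by norm_num), Int.emod_lt_of_pos _ (by norm_num)⟩

lemma tempv_nonneg (n : Int) (k : ℕ) (hn : 0 ≤ n) : 0 ≤ tempv n k := by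
  have h1 : (0:ℤ) < 10 ^ (k+1) := by positivity
  have h2 : (0:ℤ) < 10 ^ k := by positivity
  have := Int.ediv_nonneg hn h1.le
  have := Int.emod_nonneg n h2.ne'
  unfold tempv; positivity

-- the key digit identity: deleting the (k+1)-th digit instead of the k-th changes
-- the candidate by (d_k - d_{k+1}) * 10^k
lemma tempv_succ (n : Int) (k : ℕ) :
    tempv n (k + 1) - tempv n k = (dig n k - dig n (k + 1)) * 10 ^ k := by
  have e1 : n / 10 ^ (k + 1) = n / 10 ^ k / 10 := ediv_pow_succ n k
  have e2 : n / 10 ^ (k + 1 + 1) = n / 10 ^ (k + 1) / 10 := ediv_pow_succ n (k + 1)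
  unfold tempv dig
  rw [e2, e1, Int.emod_def n (10 ^ (k + 1)), Int.emod_def n (10 ^ k),
    Int.emod_def (n / 10 ^ k) 10, Int.emod_def (n / 10 ^ k / 10) 10, e1, pow_succ]
  ring

-- guard characterisation: 0 < n / 10^k ↔ k ≤ log10 n  (for 0 < n)
lemma guard_iff (n : Int) (hn : 0 < n) (k : ℕ) :
    0 < n / 10 ^ k ↔ k ≤ Nat.log 10 n.toNat := by
  have hlow : 10 ^ Nat.log 10 n.toNat ≤ n.toNat := Nat.pow_log_le_self 10 (by omega)
  have hhigh : n.toNat < 10 ^ (Nat.log 10 n.toNat + 1) := Nat.lt_pow_succ_log_self (by norm_num) _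
  constructor
  · intro h
    by_contra hc
    push_neg at hc
    have hle : 10 ^ (Nat.log 10 n.toNat + 1) ≤ 10 ^ k := Nat.pow_le_pow_right (by norm_num) (by omega)
    have hlt : n < (10:ℤ) ^ k := by
      have : ((10 ^ k : ℕ) : ℤ) = (10:ℤ) ^ k := by push_cast; ring
      omega
    have := Int.ediv_eq_zero_of_lt hn.le hlt
    omega
  · intro hk
    have hle : (10:ℤ) ^ k ≤ n := by
      have h1 : 10 ^ k ≤ 10 ^ Nat.log 10 n.toNat := Nat.pow_le_pow_right (by norm_num) hk
      have : ((10 ^ k : ℕ) : ℤ) = (10:ℤ) ^ k := by push_cast; ring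
      have : ((10 ^ Nat.log 10 n.toNat : ℕ) : ℤ) = (10:ℤ) ^ Nat.log 10 n.toNat := by push_cast; ring
      omega
    have := Int.le_ediv_iff_mul_le (a := 1) (b := n) (c := 10 ^ k) (by positivity)
    omega

lemma G_nonneg (n : Int) (k : ℕ) : 0 ≤ G n k := by
  have H : ∀ t k, (n / 10 ^ k).toNat ≤ t → 0 ≤ G n k := by
    intro t
    induction t with
    | zero =>
      intro k h
      rw [G]
      split_ifs with hg
      · exfalso; omega
      · exact le_refl 0
    | succ t ih =>
      intro k h
      rw [G]
      split_ifs with hg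
      · refine le_max_of_le_right (ih (k + 1) ?_)
        rw [ediv_pow_succ]; omega
      · exact le_refl 0
  exact H _ k le_rfl

-- every candidate is ≤ G n k
lemma le_G (n : Int) (k j : ℕ) (hkj : k ≤ j) (hg : 0 < n / 10 ^ j) : tempv n j ≤ G n k := by
  have H : ∀ d k, 0 < n / 10 ^ (k + d) → tempv n (k + d) ≤ G n k := by
    intro d
    induction d with
    | zero =>
      intro k hg
      rw [G, Nat.add_zero] at *
      rw [dif_pos hg]
      exact le_max_left _ _
    | succ d ih =>
      intro k hg
      have hgle : (10:ℤ) ^ (k + (d+1)) ≤ n := by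
        have := Int.le_ediv_iff_mul_le (a := 1) (b := n) (c := 10 ^ (k + (d+1))) (by positivity)
        omega
      have hgk : 0 < n / 10 ^ k := by
        have hpk : (10:ℤ) ^ k ≤ 10 ^ (k + (d+1)) := pow_le_pow_right₀ (by norm_num) (by omega)
        have := Int.le_ediv_iff_mul_le (a := 1) (b := n) (c := 10 ^ k) (by positivity)
        omega
      rw [G, dif_pos hgk]
      refine le_max_of_le_right ?_
      have := ih (k + 1) (by rw [show k + 1 + d = k + (d + 1) by omega]; exact hg)
      rw [show k + 1 + d = k + (d + 1) by omega] at this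
      exact this
  have := H (j - k) k (by rw [show k + (j - k) = j by omega]; exact hg)
  rw [show k + (j - k) = j by omega] at this
  exact this

-- G n k is ≤ any bound dominating all candidates
lemma G_le (n : Int) (k : ℕ) (B : Int) (hB : 0 ≤ B)
    (h : ∀ j, k ≤ j → 0 < n / 10 ^ j → tempv n j ≤ B) : G n k ≤ B := by
  have H : ∀ t k, (n / 10 ^ k).toNat ≤ t →
      (∀ j, k ≤ j → 0 < n / 10 ^ j → tempv n j ≤ B) → G n k ≤ B := by
    intro t
    induction t with
    | zero =>
      intro k hf h
      rw [G]
      split_ifs with hg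
      · exfalso; omega
      · exact hB
    | succ t ih =>
      intro k hf h
      rw [G]
      split_ifs with hg
      · refine max_le (h k le_rfl hg) (ih (k + 1) ?_ ?_)
        · rw [ediv_pow_succ]; omega
        · intro j hj hgj; exact h j (by omega) hgj
      · exact hB
  exact H _ k le_rfl h

-- A's loop computes max mx (G n k)
lemma maxLoop_congr (n i i' mx : Int) (h : i = i') (hi : 0 < i) (hi' : 0 < i') :
    maxLoop n i mx hi = maxLoop n i' mx hi' := by subst h; rfl

lemma pLoop_congr (n p p' : Int) (h : p = p') (hp : 0 < p) (hp' : 0 < p') :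
    pLoop n p hp = pLoop n p' hp' := by subst h; rfl

lemma ite_gt_eq_max (a b : Int) : (if a > b then a else b) = max b a := by
  rcases lt_or_ge b a with h | h
  · rw [if_pos h, max_eq_right h.le]
  · rw [if_neg (not_lt.mpr h), max_eq_left h]

lemma maxLoop_eq (n : Int) (k : ℕ) (mx : Int) (hmx : 0 ≤ mx) (hp : (0:ℤ) < 10 ^ k) :
    maxLoop n (10 ^ k) mx hp = max mx (G n k) := by
  have H : ∀ t k mx (hmx : 0 ≤ mx) (hp : (0:ℤ) < 10 ^ k), (n / 10 ^ k).toNat ≤ t →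
      maxLoop n (10 ^ k) mx hp = max mx (G n k) := by
    intro t
    induction t with
    | zero =>
      intro k mx hmx hp hf
      rw [maxLoop_step, G]
      by_cases hg : 0 < n / 10 ^ k
      · exfalso; omega
      · rw [if_neg hg, dif_neg hg]; exact (max_eq_left hmx).symm
    | succ t ih =>
      intro k mx hmx hp hf
      rw [maxLoop_step, G]
      by_cases hg : 0 < n / 10 ^ k
      · rw [if_pos hg, dif_pos hg]
        have hpow : (10:ℤ) ^ k * 10 = 10 ^ (k + 1) := (pow_succ 10 k).symm
        have htv : n / (10 ^ k * 10) * 10 ^ k + n % 10 ^ k = tempv n k := by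
          rw [hpow]; rfl
        rw [htv, ite_gt_eq_max]
        refine (maxLoop_congr n (10 ^ k * 10) (10 ^ (k + 1)) (max mx (tempv n k)) hpow _
          (by positivity)).trans ?_
        rw [ih (k + 1) (max mx (tempv n k)) (le_trans hmx (le_max_left _ _)) (by positivity)
          (by rw [ediv_pow_succ]; omega), max_assoc]
      · rw [if_neg hg, dif_neg hg]; exact (max_eq_left hmx).symm
  exact H _ k mx hmx hp le_rfl


-- pLoop finds the largest power of 10 that is ≤ n
lemma max_digit_eq_G (n : Int) : max_digit n = G n 0 := by
  unfold max_digit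
  rw [maxLoop_congr n 1 (10 ^ 0) 0 (by norm_num) one_pos (by positivity),
    maxLoop_eq n 0 0 le_rfl (by positivity)]
  exact max_eq_right (G_nonneg n 0)

lemma log_char (n : Int) (hn : 0 < n) (k : ℕ) (h1 : (10:ℤ) ^ k ≤ n)
    (h2 : n < 10 ^ k * 10) : Nat.log 10 n.toNat = k := by
  have c1 : ((10 ^ k : ℕ) : ℤ) = (10:ℤ) ^ k := by push_cast; ring
  have c2 : ((10 ^ (k + 1) : ℕ) : ℤ) = (10:ℤ) ^ k * 10 := by push_cast; ring
  exact Nat.log_eq_of_pow_le_of_lt_pow (by omega) (by omega)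

lemma pLoop_eq (n : Int) (hn : 0 < n) (k : ℕ) (hk : (10:ℤ) ^ k ≤ n) (hp : (0:ℤ) < 10 ^ k) :
    pLoop n (10 ^ k) hp = 10 ^ Nat.log 10 n.toNat := by
  have H : ∀ t k (hp : (0:ℤ) < 10 ^ k), (10:ℤ) ^ k ≤ n → (n - 10 ^ k).toNat ≤ t →
      pLoop n (10 ^ k) hp = 10 ^ Nat.log 10 n.toNat := by
    intro t
    induction t with
    | zero =>
      intro k hp hk hf
      rw [pLoop_step]
      split_ifs with hg
      · exfalso; omega
      · rw [log_char n hn k hk (by omega)]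
    | succ t ih =>
      intro k hp hk hf
      rw [pLoop_step]
      split_ifs with hg
      · have hpow : (10:ℤ) ^ k * 10 = 10 ^ (k + 1) := (pow_succ 10 k).symm
        exact (pLoop_congr n (10 ^ k * 10) (10 ^ (k + 1)) hpow _ (by positivity)).trans
          (ih (k + 1) (by positivity) (by omega) (by rw [← hpow]; omega))
      · rw [log_char n hn k hk (by omega)]
  exact H _ k hp hk le_rfl

-- below a strict descent position, candidates are strictly smaller
lemma low_lt (n : Int) (k : ℕ) (hk : 1 ≤ k) (hd : dig n k < dig n (k - 1)) :
    ∀ j, j < k → tempv n j + 10 ^ j ≤ tempv n k := by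
  have H : ∀ d, d ≤ k - 1 → tempv n (k - 1 - d) + 10 ^ (k - 1 - d) ≤ tempv n k := by
    intro d
    induction d with
    | zero =>
      intro _
      simp only [Nat.sub_zero]
      have hs := tempv_succ n (k - 1)
      rw [show k - 1 + 1 = k by omega] at hs
      have hP : (0:ℤ) < 10 ^ (k - 1) := by positivity
      have hdd : 1 ≤ dig n (k - 1) - dig n k := by omega
      nlinarith [hs, hdd, hP]
    | succ d ih =>
      intro hdk
      have h1 := ih (by omega)
      rw [show k - 1 - d = (k - 1 - (d + 1)) + 1 by omega] at h1
      have h2 := tempv_succ n (k - 1 - (d + 1))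
      have hb1 := dig_bounds n (k - 1 - (d + 1))
      have hb2 := dig_bounds n (k - 1 - (d + 1) + 1)
      have hP : (0:ℤ) < 10 ^ (k - 1 - (d + 1)) := by positivity
      have hpow : (10:ℤ) ^ (k - 1 - (d + 1) + 1) = 10 ^ (k - 1 - (d + 1)) * 10 := pow_succ 10 _
      nlinarith [h1, h2, hb1.1, hb1.2, hb2.1, hb2.2, hP, hpow]
  intro j hj
  have := H (k - 1 - j) (by omega)
  rw [show k - 1 - (k - 1 - j) = j by omega] at this
  exact this

-- the greedy scan returns the overall maximum
lemma qLoop_eq (n : Int) (hn : 0 < n) (k : ℕ) (hk1 : 1 ≤ k)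
    (hkm : k ≤ Nat.log 10 n.toNat)
    (hinv : ∀ j, k ≤ j → j ≤ Nat.log 10 n.toNat → tempv n j ≤ tempv n k) :
    qLoop n (10 ^ k) = G n 0 := by
  have H : ∀ k, 1 ≤ k → k ≤ Nat.log 10 n.toNat →
      (∀ j, k ≤ j → j ≤ Nat.log 10 n.toNat → tempv n j ≤ tempv n k) →
      qLoop n (10 ^ k) = G n 0 := by
    intro k
    induction k using Nat.strong_induction_on with
    | _ k ih =>
      intro hk1 hkm hinv
      rw [qLoop_step]
      have hq1 : (1:ℤ) < 10 ^ k := by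
        have h := pow_le_pow_right₀ (show (1:ℤ) ≤ 10 by norm_num) hk1
        simp only [pow_one] at h
        omega
      rw [if_pos hq1]
      have hqdiv : (10:ℤ) ^ k / 10 = 10 ^ (k - 1) := by
        rw [show (10:ℤ) ^ k = 10 ^ (k - 1) * 10 by rw [← pow_succ]; congr 1; omega]
        exact Int.mul_ediv_cancel _ (by norm_num)
      rw [hqdiv]
      have hcond : (n / 10 ^ k % 10 < n / 10 ^ (k - 1) % 10) = (dig n k < dig n (k - 1)) := rfl
      simp only [hcond]
      by_cases hlt : dig n k < dig n (k - 1)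
      · rw [if_pos hlt]
        have hpow : (10:ℤ) ^ k * 10 = 10 ^ (k + 1) := (pow_succ 10 k).symm
        have htv : n / (10 ^ k * 10) * 10 ^ k + n % 10 ^ k = tempv n k := by rw [hpow]; rfl
        rw [htv]
        have hA : tempv n k ≤ G n 0 := le_G n 0 k (Nat.zero_le _) ((guard_iff n hn k).mpr hkm)
        have hB : G n 0 ≤ tempv n k := by
          refine G_le n 0 _ (tempv_nonneg n k hn.le) ?_
          intro j _ hgj
          have hjm : j ≤ Nat.log 10 n.toNat := (guard_iff n hn j).mp hgj
          rcases Nat.lt_or_ge j k with h | h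
          · have h1 := low_lt n k hk1 hlt j h
            have h2 : (0:ℤ) < 10 ^ j := by positivity
            omega
          · exact hinv j h hjm
        exact le_antisymm hA hB
      · rw [if_neg hlt]
        push_neg at hlt
        have hs := tempv_succ n (k - 1)
        rw [show k - 1 + 1 = k by omega] at hs
        have hP : (0:ℤ) ≤ 10 ^ (k - 1) := by positivity
        have hdown : tempv n k ≤ tempv n (k - 1) := by nlinarith [hs, hlt, hP]
        have hinv' : ∀ j, k - 1 ≤ j → j ≤ Nat.log 10 n.toNat → tempv n j ≤ tempv n (k - 1) := by
          intro j hj hjm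
          rcases Nat.lt_or_ge j k with h | h
          · have hje : j = k - 1 := by omega
            rw [hje]
          · exact le_trans (hinv j h hjm) hdown
        rcases Nat.lt_or_ge 1 k with hk2 | hk2
        · exact ih (k - 1) (by omega) (by omega) (by omega) hinv'
        · have hk1' : k = 1 := by omega
          subst hk1'
          rw [show (1:ℕ) - 1 = 0 from rfl, pow_zero, qLoop_step, if_neg (by norm_num)]
          have htv0 : tempv n 0 = n / 10 := by
            unfold tempv
            norm_num [Int.emod_one]
          have hA : tempv n 0 ≤ G n 0 :=
            le_G n 0 0 le_rfl (by rw [pow_zero, Int.ediv_one]; exact hn)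
          have hB : G n 0 ≤ tempv n 0 := by
            refine G_le n 0 _ (tempv_nonneg n 0 hn.le) ?_
            intro j _ hgj
            exact hinv' j (Nat.zero_le _) ((guard_iff n hn j).mp hgj)
          omega
  exact H k hk1 hkm hinv

-- ===== VERDICT (by name: the statement is the Claim_ definition above) =====
theorem max_digit_spec : Claim_equal_max_digit := by
  intro n _
  unfold Spec_max_digit max_digit_alt
  by_cases hn : n ≤ 0
  · rw [if_pos hn]
    unfold max_digit
    rw [maxLoop_step, if_neg (by rw [Int.ediv_one]; omega)]
  · rw [if_neg hn]
    push_neg at hn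
    rw [max_digit_eq_G]
    have hploop : pLoop n 1 one_pos = 10 ^ Nat.log 10 n.toNat :=
      (pLoop_congr n 1 (10 ^ 0) (by norm_num) one_pos (by positivity)).trans
        (pLoop_eq n hn 0 (by rw [pow_zero]; omega) (by positivity))
    rw [hploop]
    rcases Nat.eq_zero_or_pos (Nat.log 10 n.toNat) with h0 | hpos
    · have hhigh : n.toNat < 10 ^ (Nat.log 10 n.toNat + 1) :=
        Nat.lt_pow_succ_log_self (by norm_num) _
      rw [h0] at hhigh
      norm_num at hhigh
      have h10 : n < 10 := by omega
      rw [h0, pow_zero, qLoop_step, if_neg (by norm_num)]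
      have hG1 : G n 1 = 0 := by
        rw [G, dif_neg (by norm_num; omega)]
      rw [G, dif_pos (by rw [pow_zero, Int.ediv_one]; exact hn), hG1]
      have htv0 : tempv n 0 = n / 10 := by
        unfold tempv
        norm_num [Int.emod_one]
      rw [htv0]
      have : n / 10 = 0 := by omega
      simp [this]
    · exact (qLoop_eq n hn (Nat.log 10 n.toNat) (by omega) le_rfl
        (fun j hj hjm => by rw [le_antisymm hjm hj])).symm
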